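-- pv_equiv track=rewrite | github.com/prabakaranc98/broCoDDE | backend/app/routes/chat.py | _find_open
-- ===== SOURCE A (Python) =====
-- _THINK_OPEN_TAGS = ["<anthropic:thinking>", "<thinking>"]
--
-- def _find_open(text: str) -> tuple[int, int]:
--     """Return (start, end_of_tag) for the first thinking open tag, or (-1, -1)."""
--     best = len(text)
--     result = (-1, -1)
--     for tag in _THINK_OPEN_TAGS:
--         idx = text.find(tag)
--         if idx != -1 and idx < best:
--             best = idx
--             result = (idx, idx + len(tag))
--     return result
-- ===== SOURCE B (Python) =====
-- _ANTH = "<anthropic:thinking>"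
-- _TH = "<thinking>"
--
-- def _find_open(text: str) -> tuple[int, int]:
--     """Return (start, end_of_tag) for the first thinking open tag, or (-1, -1)."""
--     for i in range(len(text)):
--         if text.startswith(_ANTH, i):
--             return (i, i + len(_ANTH))
--         if text.startswith(_TH, i):
--             return (i, i + len(_TH))
--     return (-1, -1)
-- ===== Notes on version B (the rewrite author's own statement) =====
-- stated objective: alternative
-- what changed: One left-to-right scan over positions checking both tags with startswith and returning at the first match, instead of one full .find pass per tag followed by taking the minimum index.
import Mathlib
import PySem

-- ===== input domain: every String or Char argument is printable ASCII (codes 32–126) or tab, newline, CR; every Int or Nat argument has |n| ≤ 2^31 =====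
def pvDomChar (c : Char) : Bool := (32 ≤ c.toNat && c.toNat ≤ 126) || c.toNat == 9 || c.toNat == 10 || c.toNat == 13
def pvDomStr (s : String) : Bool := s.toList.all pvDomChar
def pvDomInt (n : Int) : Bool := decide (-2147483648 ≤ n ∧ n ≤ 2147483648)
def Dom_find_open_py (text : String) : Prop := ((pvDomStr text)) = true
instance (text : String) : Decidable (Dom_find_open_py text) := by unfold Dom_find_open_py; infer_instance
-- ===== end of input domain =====

-- B replaces the per-tag .find + minimum with a single left-to-right scan returning at the
-- first position where either tag starts (alternative decomposition, same cost).

-- ===== PORT A =====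
-- A: best = len(text); for tag in tags: idx = text.find(tag); if idx != -1 and idx < best: …
def find_open_py (text : String) : Int × Int :=
  (List.foldl
    (fun (st : Int × (Int × Int)) (tag : String) =>
      let idx := PySem.Str.find text tag
      if idx ≠ -1 ∧ idx < st.1 then (idx, (idx, idx + (PySem.Str.len tag : Int))) else st)
    (PySem.Str.len text, (-1, -1))
    ["<anthropic:thinking>", "<thinking>"]).2

-- ===== PORT B =====
-- B's loop 'for i in range(len(text))' with text.startswith(tag, i), as structural recursion
-- over the character list carrying the current index i.
def pvScanB : List Char → Nat → Int × Int
  | [], _ => (-1, -1)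
  | c :: rest, i =>
    if "<anthropic:thinking>".toList.isPrefixOf (c :: rest) then ((i : Int), (i : Int) + 20)
    else if "<thinking>".toList.isPrefixOf (c :: rest) then ((i : Int), (i : Int) + 10)
    else pvScanB rest (i + 1)

def find_open_py_alt (text : String) : Int × Int := pvScanB text.toList 0

-- ===== PRECONDITION & SPEC =====
def Spec_find_open_py (text : String) (out : Int × Int) : Prop := out = find_open_py_alt text
instance (text : String) (out : Int × Int) : Decidable (Spec_find_open_py text out) := by unfold Spec_find_open_py; infer_instance

-- ===== CLAIM (what is proved, stated in full; the proofs are below) =====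
def Claim_equal_find_open_py : Prop := ∀ (text : String), Dom_find_open_py text → Spec_find_open_py text (find_open_py text)

-- ===== LEMMAS AND PROOFS =====

-- the two tags can never both start at the same position (they differ at offset 1)
theorem pv_not_both (l : List Char) :
    "<anthropic:thinking>".toList <+: l → "<thinking>".toList <+: l → False := by
  rintro ⟨t1, rfl⟩ h2
  have e2 : ("<anthropic:thinking>".toList ++ t1)[1]? = some 't' := by
    obtain ⟨t2, he⟩ := h2
    rw [← he, List.getElem?_append_left (by decide)]; decide
  rw [List.getElem?_append_left (by decide)] at e2
  simp at e2

theorem pvScanB_none : ∀ (s : List Char) (i : Nat),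
    (∀ j, ¬ "<anthropic:thinking>".toList <+: s.drop j) →
    (∀ j, ¬ "<thinking>".toList <+: s.drop j) →
    pvScanB s i = (-1, -1) := by
  intro s
  induction s with
  | nil => intro i _ _; rfl
  | cons c rest ih =>
    intro i hA hT
    have h0A := hA 0; have h0T := hT 0
    simp only [List.drop_zero] at h0A h0T
    simp only [pvScanB]
    rw [if_neg (fun hb => h0A (List.isPrefixOf_iff_prefix.mp hb)),
        if_neg (fun hb => h0T (List.isPrefixOf_iff_prefix.mp hb))]
    exact ih (i + 1) (fun j => hA (j + 1)) (fun j => hT (j + 1))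

theorem pvScanB_A : ∀ (s : List Char) (i m : Nat),
    (∀ j < m, ¬ "<anthropic:thinking>".toList <+: s.drop j) →
    (∀ j < m, ¬ "<thinking>".toList <+: s.drop j) →
    "<anthropic:thinking>".toList <+: s.drop m →
    pvScanB s i = (((i + m : Nat) : Int), ((i + m : Nat) : Int) + 20) := by
  intro s
  induction s with
  | nil =>
    intro i m _ _ hm
    rw [List.drop_nil] at hm
    exact absurd (List.prefix_nil.mp hm) (by decide)
  | cons c rest ih =>
    intro i m hA hT hm
    cases m with
    | zero =>
      simp only [List.drop_zero] at hm
      simp only [pvScanB]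
      rw [if_pos (List.isPrefixOf_iff_prefix.mpr hm)]
      simp
    | succ m' =>
      have h0A := hA 0 (Nat.succ_pos _); have h0T := hT 0 (Nat.succ_pos _)
      simp only [List.drop_zero] at h0A h0T
      simp only [pvScanB]
      rw [if_neg (fun hb => h0A (List.isPrefixOf_iff_prefix.mp hb)),
          if_neg (fun hb => h0T (List.isPrefixOf_iff_prefix.mp hb))]
      rw [List.drop_succ_cons] at hm
      have := ih (i + 1) m'
        (fun j hj => by simpa using hA (j + 1) (by omega))
        (fun j hj => by simpa using hT (j + 1) (by omega)) hm
      rw [show i + 1 + m' = i + (m' + 1) from by omega] at this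
      exact this

theorem pvScanB_T : ∀ (s : List Char) (i m : Nat),
    (∀ j < m, ¬ "<anthropic:thinking>".toList <+: s.drop j) →
    (∀ j < m, ¬ "<thinking>".toList <+: s.drop j) →
    "<thinking>".toList <+: s.drop m →
    pvScanB s i = (((i + m : Nat) : Int), ((i + m : Nat) : Int) + 10) := by
  intro s
  induction s with
  | nil =>
    intro i m _ _ hm
    rw [List.drop_nil] at hm
    exact absurd (List.prefix_nil.mp hm) (by decide)
  | cons c rest ih =>
    intro i m hA hT hm
    cases m with
    | zero =>
      simp only [List.drop_zero] at hm
      have hnA : ¬ "<anthropic:thinking>".toList <+: (c :: rest) :=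
        fun h => pv_not_both _ h hm
      simp only [pvScanB]
      rw [if_neg (fun hb => hnA (List.isPrefixOf_iff_prefix.mp hb)),
          if_pos (List.isPrefixOf_iff_prefix.mpr hm)]
      simp
    | succ m' =>
      have h0A := hA 0 (Nat.succ_pos _); have h0T := hT 0 (Nat.succ_pos _)
      simp only [List.drop_zero] at h0A h0T
      simp only [pvScanB]
      rw [if_neg (fun hb => h0A (List.isPrefixOf_iff_prefix.mp hb)),
          if_neg (fun hb => h0T (List.isPrefixOf_iff_prefix.mp hb))]
      rw [List.drop_succ_cons] at hm
      have := ih (i + 1) m'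
        (fun j hj => by simpa using hA (j + 1) (by omega))
        (fun j hj => by simpa using hT (j + 1) (by omega)) hm
      rw [show i + 1 + m' = i + (m' + 1) from by omega] at this
      exact this

-- a nonempty occurrence lies strictly inside the string
theorem pv_find_lt_len (s sub : List Char) (hne : sub ≠ [])
    (h : sub <:+: s) : PySem.Chars.find s sub < (s.length : Int) := by
  have h0 : 0 ≤ PySem.Chars.find s sub := (PySem.Chars.find_nonneg_iff s sub).mpr h
  have hpre := (PySem.Chars.find_spec h0).1
  have hle := hpre.length_le
  rw [List.length_drop] at hle
  have hsub : 0 < sub.length := List.length_pos_iff.mpr hne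
  omega

-- if sub occurs nowhere, it starts at no position
theorem pv_no_prefix (s sub : List Char) (h : ¬ sub <:+: s) :
    ∀ j, ¬ sub <+: s.drop j := by
  intro j hj
  obtain ⟨t, ht⟩ := hj
  exact h ⟨s.take j, t, by rw [List.append_assoc, ht, List.take_append_drop]⟩

theorem find_open_py_eq (text : String) : find_open_py text = find_open_py_alt text := by
  set s := text.toList with hs
  set A := "<anthropic:thinking>".toList with hA'
  set T := "<thinking>".toList with hT'
  simp only [find_open_py, find_open_py_alt, List.foldl, PySem.Str.find_eq,
    PySem.Str.len_eq, ← hs, ← hA', ← hT']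
  have hLA : (A.length : Int) = 20 := by rw [hA']; decide
  have hLT : (T.length : Int) = 10 := by rw [hT']; decide
  have hm1A := PySem.Chars.neg_one_le_find s A
  have hm1T := PySem.Chars.neg_one_le_find s T
  split_ifs with h1 h2 h2
  · -- both tags found, thinking strictly earlier
    have h0A : 0 ≤ PySem.Chars.find s A := by omega
    have h0T : 0 ≤ PySem.Chars.find s T := by omega
    have hsA := PySem.Chars.find_spec h0A
    have hsT := PySem.Chars.find_spec h0T
    have hlt : (PySem.Chars.find s T).toNat < (PySem.Chars.find s A).toNat := by omega
    rw [pvScanB_T s 0 (PySem.Chars.find s T).toNat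
      (fun j hj => hsA.2 j (by omega)) hsT.2 hsT.1]
    simp [Int.toNat_of_nonneg h0T, hLT]
  · -- anthropic found, thinking absent or not earlier
    have h0A : 0 ≤ PySem.Chars.find s A := by omega
    have hsA := PySem.Chars.find_spec h0A
    have hTnone : ∀ j < (PySem.Chars.find s A).toNat, ¬ T <+: s.drop j := by
      intro j hj hpre
      by_cases hocc : T <:+: s
      · have h0T : 0 ≤ PySem.Chars.find s T := (PySem.Chars.find_nonneg_iff s T).mpr hocc
        have hge : ¬ PySem.Chars.find s T < PySem.Chars.find s A := fun hlt =>
          h2 ⟨by omega, hlt⟩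
        exact (PySem.Chars.find_spec h0T).2 j (by omega) hpre
      · exact pv_no_prefix s T hocc j hpre
    rw [pvScanB_A s 0 (PySem.Chars.find s A).toNat hsA.2 hTnone hsA.1]
    simp [Int.toNat_of_nonneg h0A, hLA]
  · -- anthropic absent (or past the end), thinking found
    have hnA : ¬ A <:+: s := by
      intro hocc
      exact h1 ⟨by
        have := (PySem.Chars.find_ne_neg_one_iff s A).mpr hocc; omega,
        pv_find_lt_len s A (by rw [hA']; decide) hocc⟩
    have h0T : 0 ≤ PySem.Chars.find s T := by omega
    have hsT := PySem.Chars.find_spec h0T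
    rw [pvScanB_T s 0 (PySem.Chars.find s T).toNat
      (fun j _ => pv_no_prefix s A hnA j) hsT.2 hsT.1]
    simp [Int.toNat_of_nonneg h0T, hLT]
  · -- neither tag occurs
    have hnA : ¬ A <:+: s := by
      intro hocc
      exact h1 ⟨by
        have := (PySem.Chars.find_ne_neg_one_iff s A).mpr hocc; omega,
        pv_find_lt_len s A (by rw [hA']; decide) hocc⟩
    have hnT : ¬ T <:+: s := by
      intro hocc
      exact h2 ⟨by
        have := (PySem.Chars.find_ne_neg_one_iff s T).mpr hocc; omega,
        pv_find_lt_len s T (by rw [hT']; decide) hocc⟩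
    rw [pvScanB_none s 0 (pv_no_prefix s A hnA) (pv_no_prefix s T hnT)]

-- ===== VERDICT (by name: the statement is the Claim_ definition above) =====
theorem find_open_py_spec : Claim_equal_find_open_py := by
  intro text _
  unfold Spec_find_open_py
  exact find_open_py_eq text
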